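-- pv_equiv track=rewrite | github.com/davealexenglish/gmail-tools | filters.py | _message_matches_keywords
-- ===== SOURCE A (Python) =====
-- from typing import List, Dict
--
-- def _message_matches_keywords(
--     message: Dict,
--     keywords: List[str],
--     search_subject: bool,
--     search_body: bool,
--     case_sensitive: bool
-- ) -> bool:
--     """
--     Check if message matches any keyword.
--
--     Args:
--         message: Message dictionary
--         keywords: Keywords to search for
--         search_subject: Search in subject
--         search_body: Search in body
--         case_sensitive: Case-sensitive search
--
--     Returns:
--         True if any keyword matches
--     """
--     search_text = ''
--
--     if search_subject:
--         search_text += message.get('subject', '') + ' '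
--
--     if search_body:
--         search_text += message.get('body_text', '') + ' '
--         search_text += message.get('body_html', '') + ' '
--         search_text += message.get('snippet', '')
--
--     if not case_sensitive:
--         search_text = search_text.lower()
--         keywords = [k.lower() for k in keywords]
--
--     # Check if any keyword matches
--     for keyword in keywords:
--         if keyword in search_text:
--             return True
--
--     return False
-- ===== SOURCE B (Python) =====
-- import re
--
--
-- def _message_matches_keywords(message, keywords, search_subject, search_body, case_sensitive):
--     pieces = []
--     if search_subject:
--         pieces.append(message.get('subject', '') + ' ')
--     if search_body:
--         pieces.append(message.get('body_text', '') + ' ')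
--         pieces.append(message.get('body_html', '') + ' ')
--         pieces.append(message.get('snippet', ''))
--     text = ''.join(pieces)
--     if not case_sensitive:
--         text = text.lower()
--         keywords = [k.lower() for k in keywords]
--     if not keywords:
--         return False
--     pattern = '|'.join(re.escape(k) for k in keywords)
--     return re.search(pattern, text) is not None
-- ===== Notes on version B (the rewrite author's own statement) =====
-- stated objective: idiomatic
-- what changed: Replaces the keyword-by-keyword substring loop with a single regex search: the keywords are escaped and joined into one alternation pattern and the regex engine scans the search text once (with an early False for an empty keyword list, where an empty pattern would spuriously match).
import Mathlib
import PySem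

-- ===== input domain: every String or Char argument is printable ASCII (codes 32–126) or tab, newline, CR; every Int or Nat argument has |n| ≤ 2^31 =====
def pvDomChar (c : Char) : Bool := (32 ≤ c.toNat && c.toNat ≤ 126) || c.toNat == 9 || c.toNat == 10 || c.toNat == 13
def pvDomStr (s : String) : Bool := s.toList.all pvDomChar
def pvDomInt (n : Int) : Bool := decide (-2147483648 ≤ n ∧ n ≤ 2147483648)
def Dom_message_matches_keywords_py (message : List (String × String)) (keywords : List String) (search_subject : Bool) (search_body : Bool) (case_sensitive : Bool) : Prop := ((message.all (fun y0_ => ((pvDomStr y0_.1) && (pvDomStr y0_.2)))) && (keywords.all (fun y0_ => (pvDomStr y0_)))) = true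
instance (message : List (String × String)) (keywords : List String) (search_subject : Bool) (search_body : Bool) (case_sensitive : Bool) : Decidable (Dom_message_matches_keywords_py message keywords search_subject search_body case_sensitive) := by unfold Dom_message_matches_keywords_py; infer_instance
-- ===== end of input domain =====

-- B builds the same search text from a list of pieces joined once, then matches all
-- keywords in a single regex alternation search instead of a keyword-by-keyword loop
-- (objective: idiomatic, same cost).


-- ===== PORT A =====
-- literal transliteration of A: build search_text by successive '+=', lower both sides
-- when not case_sensitive, then 'for keyword in keywords: if keyword in search_text: return True'
def message_matches_keywords_py (message : List (String × String)) (keywords : List String) (search_subject : Bool) (search_body : Bool) (case_sensitive : Bool) : Bool :=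
  let d := PySem.Dict.ofList message
  let st : List Char := []
  let st := if search_subject then st ++ (d.getD "subject" "").toList ++ [' '] else st
  let st := if search_body then
      ((st ++ (d.getD "body_text" "").toList ++ [' ']) ++ (d.getD "body_html" "").toList ++ [' ']) ++ (d.getD "snippet" "").toList
    else st
  let st := if !case_sensitive then PySem.Chars.lower st else st
  let kws := if !case_sensitive then keywords.map (fun k => PySem.Chars.lower k.toList) else keywords.map String.toList
  kws.any (fun k => PySem.Chars.isIn k st)

-- ===== PORT B =====
-- re.search(p, text) where p is '|'.join(re.escape(k) for k in alts): since every
-- alternative is an escaped literal, a match exists iff some alternative starts at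
-- some position 0..len(text) of the text (a position equal to len(text) only hosts
-- an empty alternative). This helper is that exact contract of the stdlib call.
def regexSearchLiteralAlt (alts : List (List Char)) (text : List Char) : Bool :=
  (List.range (text.length + 1)).any (fun i => alts.any (fun k => PySem.Chars.startswith (text.drop i) k))

-- literal transliteration of B: pieces list joined once, lowering, early False on an
-- empty keyword list, then one regex alternation search (ported via regexSearchLiteralAlt).
def message_matches_keywords_py_alt (message : List (String × String)) (keywords : List String) (search_subject : Bool) (search_body : Bool) (case_sensitive : Bool) : Bool :=
  let d := PySem.Dict.ofList message
  let pieces : List (List Char) :=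
    (if search_subject then [(d.getD "subject" "").toList ++ [' ']] else []) ++
    (if search_body then
        [(d.getD "body_text" "").toList ++ [' '],
         (d.getD "body_html" "").toList ++ [' '],
         (d.getD "snippet" "").toList]
      else [])
  let text := pieces.flatten
  let text := if !case_sensitive then PySem.Chars.lower text else text
  let kws := if !case_sensitive then keywords.map (fun k => PySem.Chars.lower k.toList) else keywords.map String.toList
  if kws.isEmpty then false
  else regexSearchLiteralAlt kws text

-- ===== PRECONDITION & SPEC =====
def Spec_message_matches_keywords_py (message : List (String × String)) (keywords : List String) (search_subject : Bool) (search_body : Bool) (case_sensitive : Bool) (out : Bool) : Prop := out = message_matches_keywords_py_alt message keywords search_subject search_body case_sensitive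
instance (message : List (String × String)) (keywords : List String) (search_subject : Bool) (search_body : Bool) (case_sensitive : Bool) (out : Bool) : Decidable (Spec_message_matches_keywords_py message keywords search_subject search_body case_sensitive out) := by unfold Spec_message_matches_keywords_py; infer_instance

-- ===== CLAIM (what is proved, stated in full; the proofs are below) =====
def Claim_equal_message_matches_keywords_py : Prop := ∀ (message : List (String × String)) (keywords : List String) (search_subject : Bool) (search_body : Bool) (case_sensitive : Bool), Dom_message_matches_keywords_py message keywords search_subject search_body case_sensitive → Spec_message_matches_keywords_py message keywords search_subject search_body case_sensitive (message_matches_keywords_py message keywords search_subject search_body case_sensitive)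

-- ===== LEMMAS AND PROOFS =====

-- core fact: 'some keyword is a substring of text' equals 'the keyword list is
-- nonempty and the literal-alternation search succeeds'
theorem any_isIn_eq_regexSearch (kws : List (List Char)) (text : List Char) :
    kws.any (fun k => PySem.Chars.isIn k text) =
      (if kws.isEmpty then false else regexSearchLiteralAlt kws text) := by
  split_ifs with h
  · simp [List.isEmpty_iff.mp h]
  · unfold regexSearchLiteralAlt
    apply Bool.eq_iff_iff.mpr
    simp only [List.any_eq_true, List.mem_range]
    constructor
    · rintro ⟨k, hk, hin⟩
      obtain ⟨j, hpre⟩ := (PySem.Chars.exists_prefix_drop_iff_isIn k text).mpr hin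
      refine ⟨min j text.length, by omega, k, hk, (PySem.Chars.startswith_iff _ _).mpr ?_⟩
      by_cases hj : j ≤ text.length
      · simpa [min_eq_left hj] using hpre
      · have hnil : text.drop j = [] := List.drop_eq_nil_of_le (by omega)
        have : k = [] := List.prefix_nil.mp (hnil ▸ hpre)
        simp [this]
    · rintro ⟨i, _, k, hk, hsw⟩
      exact ⟨k, hk, (PySem.Chars.exists_prefix_drop_iff_isIn k text).mp
        ⟨i, (PySem.Chars.startswith_iff _ _).mp hsw⟩⟩

-- ===== VERDICT (by name: the statement is the Claim_ definition above) =====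
theorem message_matches_keywords_py_spec : Claim_equal_message_matches_keywords_py := by
  intro message keywords ss sb cs _
  unfold Spec_message_matches_keywords_py message_matches_keywords_py message_matches_keywords_py_alt
  rw [any_isIn_eq_regexSearch]
  cases ss <;> cases sb <;> cases cs <;> simp
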